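-- pv_equiv track=rewrite | github.com/8FAX/CompSci141 | final/printedWords.py | printedWords
-- ===== SOURCE A (Python) =====
-- def printedWords(words: dict) -> list:
--     year_counts = {}
--     for sub_dict in words.values():
--         for year, count in sub_dict.items():
--             if year in year_counts:
--                 year_counts[year] += count
--             else:
--                 year_counts[year] = count
--     return sorted(year_counts.items())
-- ===== SOURCE B (Python) =====
-- def printedWords(words: dict) -> list:
--     # sort all raw (year, count) pairs first, then aggregate adjacent runs
--     pairs = sorted((year, count) for sub in words.values() for year, count in sub.items())
--     out = []
--     for year, count in pairs:
--         if out and out[-1][0] == year: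
--             out[-1] = (year, out[-1][1] + count)
--         else:
--             out.append((year, count))
--     return out
-- ===== Notes on version B (the rewrite author's own statement) =====
-- stated objective: alternative
-- what changed: A hash-aggregates counts per year in a dict and sorts the aggregated items at the end; B flattens all raw (year, count) pairs, sorts them first, and then aggregates by merging adjacent equal-year runs in one scan.
import Mathlib
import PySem

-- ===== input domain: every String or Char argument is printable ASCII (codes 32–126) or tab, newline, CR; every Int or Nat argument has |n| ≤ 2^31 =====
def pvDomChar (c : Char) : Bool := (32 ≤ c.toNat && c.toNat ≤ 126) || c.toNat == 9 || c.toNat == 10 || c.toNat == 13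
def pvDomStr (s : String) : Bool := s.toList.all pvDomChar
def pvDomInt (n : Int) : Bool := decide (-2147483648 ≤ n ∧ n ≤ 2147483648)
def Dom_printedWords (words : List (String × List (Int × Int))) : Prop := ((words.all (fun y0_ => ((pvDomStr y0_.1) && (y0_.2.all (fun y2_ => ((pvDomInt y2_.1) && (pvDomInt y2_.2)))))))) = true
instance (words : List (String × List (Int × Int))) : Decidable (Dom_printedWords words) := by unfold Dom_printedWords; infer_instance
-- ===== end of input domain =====

-- B aggregates by sorting the raw (year, count) pairs first and merging adjacent equal-year
-- runs, instead of A's dict accumulation followed by a final sort (objective: alternative).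

-- ===== PORT A =====
def printedWords (words : List (String × List (Int × Int))) : List (Int × Int) :=
  PySem.List.sorted2
    ((PySem.Dict.ofList words).values.foldl
      (fun yearCounts subDict =>
        (PySem.Dict.ofList subDict).items.foldl
          (fun yearCounts p =>
            if yearCounts.contains p.1 then yearCounts.modify p.1 0 (· + p.2)
            else yearCounts.insert p.1 p.2)
          yearCounts)
      (PySem.Dict.empty : PySem.Dict Int Int)).items
    (fun p => p.1) (fun p => p.2) false

-- ===== PORT B =====
-- the loop body of B's single aggregation pass (out[-1] merge / append)
def pvGroupStep (out : List (Int × Int)) (p : Int × Int) : List (Int × Int) :=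
  match out.getLast? with
  | some q => if q.1 == p.1 then out.dropLast ++ [(p.1, q.2 + p.2)] else out ++ [p]
  | none => out ++ [p]

def printedWords_alt (words : List (String × List (Int × Int))) : List (Int × Int) :=
  (PySem.List.sorted2
    ((PySem.Dict.ofList words).values.flatMap (fun subDict => (PySem.Dict.ofList subDict).items))
    (fun p => p.1) (fun p => p.2) false).foldl pvGroupStep []

-- ===== PRECONDITION & SPEC =====
def Spec_printedWords (words : List (String × List (Int × Int))) (out : List (Int × Int)) : Prop := out = printedWords_alt words
instance (words : List (String × List (Int × Int))) (out : List (Int × Int)) : Decidable (Spec_printedWords words out) := by unfold Spec_printedWords; infer_instance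

-- ===== CLAIM (what is proved, stated in full; the proofs are below) =====
def Claim_equal_printedWords : Prop := ∀ (words : List (String × List (Int × Int))), Dom_printedWords words → Spec_printedWords words (printedWords words)

-- ===== LEMMAS AND PROOFS =====

-- all raw (year, count) pairs, in iteration order
def pvPairs (words : List (String × List (Int × Int))) : List (Int × Int) :=
  (PySem.Dict.ofList words).values.flatMap (fun subDict => (PySem.Dict.ofList subDict).items)

-- total count for a given year
def pvSum (l : List (Int × Int)) (y : Int) : Int :=
  ((l.filter (fun p => p.1 == y)).map (fun p => p.2)).sum

-- the aggregate of l: one (year, total) pair per distinct year, in first-occurrence order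
def pvCanon (l : List (Int × Int)) : List (Int × Int) :=
  (PySem.Set.ofList (l.map (fun p => p.1))).map (fun y => (y, pvSum l y))

-- what B's aggregation loop produces after the current run leader p0
def pvGrp : Int × Int → List (Int × Int) → List (Int × Int)
  | p0, [] => [p0]
  | p0, p :: ps => if p0.1 == p.1 then pvGrp (p.1, p0.2 + p.2) ps else p0 :: pvGrp p ps

lemma pv_foldl_flatMap {α β σ : Type} (ls : List α) (f : α → List β) (g : σ → β → σ) (a : σ) :
    (ls.flatMap f).foldl g a = ls.foldl (fun a' x => (f x).foldl g a') a := by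
  induction ls generalizing a with
  | nil => rfl
  | cons x xs ih => simp [List.flatMap_cons, List.foldl_append, ih]

lemma pv_step_eq (yc : PySem.Dict Int Int) (p : Int × Int) :
    (if yc.contains p.1 then yc.modify p.1 0 (· + p.2) else yc.insert p.1 p.2)
      = yc.insert p.1 (yc.getD p.1 0 + p.2) := by
  split_ifs with h
  · rfl
  · rw [Bool.not_eq_true] at h
    rw [PySem.Dict.getD_of_not_contains yc 0 h, zero_add]

lemma pv_pvSum_nil (y : Int) : pvSum [] y = 0 := rfl

lemma pv_pvSum_cons (p : Int × Int) (l : List (Int × Int)) (y : Int) :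
    pvSum (p :: l) y = (if p.1 = y then p.2 else 0) + pvSum l y := by
  by_cases h : p.1 = y <;> simp [pvSum, List.filter_cons, h]

lemma pv_pvSum_append_singleton (l : List (Int × Int)) (p : Int × Int) (y : Int) :
    pvSum (l ++ [p]) y = pvSum l y + (if p.1 = y then p.2 else 0) := by
  by_cases h : p.1 = y <;> simp [pvSum, List.filter_append, List.filter_cons, h]

lemma pv_pvSum_eq_zero {l : List (Int × Int)} {y : Int} (h : ∀ q ∈ l, q.1 ≠ y) :
    pvSum l y = 0 := by
  have : l.filter (fun p => p.1 == y) = [] :=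
    List.filter_eq_nil_iff.mpr (fun q hq => by simp [h q hq])
  simp [pvSum, this]

lemma pv_pvSum_perm {l l' : List (Int × Int)} (h : l.Perm l') (y : Int) :
    pvSum l y = pvSum l' y :=
  ((h.filter _).map _).sum_eq

lemma pv_getD_foldl (l : List (Int × Int)) (d : PySem.Dict Int Int) :
    ∀ y, (l.foldl (fun d p => d.insert p.1 (d.getD p.1 0 + p.2)) d).getD y 0
      = d.getD y 0 + pvSum l y := by
  induction l using List.reverseRecOn with
  | nil => intro y; simp [pv_pvSum_nil]
  | append_singleton l p ih =>
    intro y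
    rw [List.foldl_append, List.foldl_cons, List.foldl_nil, PySem.Dict.getD_insert,
      pv_pvSum_append_singleton]
    by_cases h : y = p.1
    · subst h; rw [if_pos rfl, if_pos rfl, ih]; ring
    · rw [if_neg h, if_neg (fun e => h e.symm), ih]; ring

lemma pv_nodup_keys_foldl (l : List (Int × Int)) :
    (l.foldl (fun d p => d.insert p.1 (d.getD p.1 0 + p.2))
      (PySem.Dict.empty : PySem.Dict Int Int)).keys.Nodup :=
  PySem.Dict.nodup_keys_foldl_insert_key l (fun p => p.1) (fun d p => d.getD p.1 0 + p.2) _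
    (by simp [PySem.Dict.keys_empty])

lemma pv_keys_foldl (l : List (Int × Int)) :
    (l.foldl (fun d p => d.insert p.1 (d.getD p.1 0 + p.2))
      (PySem.Dict.empty : PySem.Dict Int Int)).keys
      = PySem.Set.ofList (l.map (fun p => p.1)) := by
  rw [PySem.Dict.keys_foldl_insert_key l (fun p => p.1) (fun d p => d.getD p.1 0 + p.2),
    PySem.Dict.keys_empty, PySem.Set.update_nil_left]

lemma pv_items_foldl (l : List (Int × Int)) :
    (l.foldl (fun d p => d.insert p.1 (d.getD p.1 0 + p.2))
      (PySem.Dict.empty : PySem.Dict Int Int)).items = pvCanon l := by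
  rw [PySem.Dict.items_eq_map_keys _ (pv_nodup_keys_foldl l) 0, pv_keys_foldl, pvCanon]
  exact List.map_congr_left (fun y _ => by
    rw [pv_getD_foldl, PySem.Dict.getD_empty, zero_add])

lemma pv_insertBy_pairwise (before : Int × Int → Int × Int → Bool)
    (ht : ∀ a b, before a b = true → a.1 ≤ b.1)
    (hf : ∀ a b, before a b = false → b.1 ≤ a.1)
    (x : Int × Int) :
    ∀ ys : List (Int × Int), ys.Pairwise (fun a b => a.1 ≤ b.1) →
      (PySem.List.insertBy before x ys).Pairwise (fun a b => a.1 ≤ b.1) := by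
  intro ys
  induction ys with
  | nil => intro _; rw [PySem.List.insertBy.eq_1]; exact List.pairwise_singleton _ _
  | cons y ys ih =>
    intro hp
    rcases List.pairwise_cons.mp hp with ⟨hy, hys⟩
    rw [PySem.List.insertBy.eq_2]
    split_ifs with hb
    · refine List.pairwise_cons.mpr ⟨?_, hp⟩
      intro z hz
      rcases List.mem_cons.mp hz with rfl | hz'
      · exact ht x z hb
      · exact le_trans (ht x y hb) (hy z hz')
    · refine List.pairwise_cons.mpr ⟨?_, ih hys⟩
      intro z hz
      rcases List.mem_cons.mp ((PySem.List.insertBy_perm before x ys).mem_iff.mp hz) with rfl | hz'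
      · exact hf z y (Bool.not_eq_true _ ▸ hb)
      · exact hy z hz'

lemma pv_sorted2_pairwise (xs : List (Int × Int)) :
    (PySem.List.sorted2 xs (fun p => p.1) (fun p => p.2) false).Pairwise
      (fun a b => a.1 ≤ b.1) := by
  have key : ∀ (l : List (Int × Int)) (acc : List (Int × Int)),
      acc.Pairwise (fun a b => a.1 ≤ b.1) →
      (l.foldl (fun acc x => PySem.List.insertBy
        (fun a b => decide (a.1 < b.1) || (!decide (b.1 < a.1) && decide (a.2 < b.2))) x acc) acc).Pairwise
        (fun a b => a.1 ≤ b.1) := by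
    intro l
    induction l with
    | nil => intro acc h; exact h
    | cons x l ih =>
      intro acc h
      exact ih _ (pv_insertBy_pairwise _
        (fun a b hb => by simp at hb; omega)
        (fun a b hb => by simp at hb; omega) x acc h)
  exact key xs [] List.Pairwise.nil

lemma pv_sorted2_eq (xs ys : List (Int × Int)) (hperm : ys.Perm xs)
    (hlt : ys.Pairwise (fun a b => a.1 < b.1)) :
    PySem.List.sorted2 xs (fun p => p.1) (fun p => p.2) false = ys :=
  PySem.List.eq_of_perm_of_pairwise_le_of_pairwise_lt (fun p => p.1)
    ((PySem.List.sorted2_perm xs _ _ false).trans hperm.symm) (pv_sorted2_pairwise xs) hlt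

lemma pv_discard_of_not_mem {x : Int} {s : List Int} (h : x ∉ s) :
    PySem.Set.discard s x = s := by
  refine List.filter_eq_self.mpr (fun y hy => ?_)
  have hne : y ≠ x := fun e => h (e ▸ hy)
  simp [hne]

lemma pv_ofList_sublist (xs : List Int) : (PySem.Set.ofList xs).Sublist xs := by
  induction xs with
  | nil => exact List.Sublist.refl _
  | cons x xs ih =>
    rw [PySem.Set.ofList_cons]
    exact List.Sublist.cons₂ x (List.Sublist.trans List.filter_sublist ih)

lemma pv_pairwise_lt_ofList (xs : List Int) (h : xs.Pairwise (· ≤ ·)) :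
    (PySem.Set.ofList xs).Pairwise (· < ·) := by
  have hle : (PySem.Set.ofList xs).Pairwise (· ≤ ·) :=
    List.Pairwise.sublist (pv_ofList_sublist xs) h
  have hnd : (PySem.Set.ofList xs).Pairwise (· ≠ ·) := PySem.Set.nodup_ofList xs
  exact (hle.and hnd).imp (fun hab => lt_of_le_of_ne hab.1 hab.2)

lemma pv_ofList_cons_cons (a : Int) (l : List Int) :
    PySem.Set.ofList (a :: a :: l) = PySem.Set.ofList (a :: l) := by
  simp [PySem.Set.ofList_cons, PySem.Set.discard, List.filter_cons, List.filter_filter]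

lemma pv_foldl_grp (ps : List (Int × Int)) :
    ∀ (acc : List (Int × Int)) (p0 : Int × Int),
      ps.foldl pvGroupStep (acc ++ [p0]) = acc ++ pvGrp p0 ps := by
  induction ps with
  | nil => intro acc p0; simp [pvGrp]
  | cons p ps ih =>
    intro acc p0
    rw [List.foldl_cons]
    have hstep : pvGroupStep (acc ++ [p0]) p =
        if p0.1 == p.1 then acc ++ [(p.1, p0.2 + p.2)] else (acc ++ [p0]) ++ [p] := by
      simp [pvGroupStep, List.getLast?_concat, List.dropLast_concat]
    by_cases h : p0.1 = p.1
    · rw [hstep, if_pos (by simp [h])]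
      rw [ih acc (p.1, p0.2 + p.2)]
      simp [pvGrp, h]
    · rw [hstep, if_neg (by simp [h])]
      rw [ih (acc ++ [p0]) p]
      simp [pvGrp, h]

lemma pv_grp_canon (ps : List (Int × Int)) :
    ∀ p0 : Int × Int, (p0 :: ps).Pairwise (fun a b => a.1 ≤ b.1) →
      pvGrp p0 ps = pvCanon (p0 :: ps) := by
  induction ps with
  | nil =>
    intro p0 _
    simp [pvGrp, pvCanon, pvSum, PySem.Set.ofList_cons, PySem.Set.discard]
  | cons p ps ih =>
    intro p0 hp
    have hp0 : ∀ z ∈ p :: ps, p0.1 ≤ z.1 := (List.pairwise_cons.mp hp).1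
    have hp1 : (p :: ps).Pairwise (fun a b => a.1 ≤ b.1) := (List.pairwise_cons.mp hp).2
    by_cases h : p0.1 = p.1
    · rw [pvGrp, if_pos (by simp [h])]
      have hq : ((p.1, p0.2 + p.2) :: ps).Pairwise (fun a b => a.1 ≤ b.1) :=
        List.pairwise_cons.mpr ⟨fun z hz => (List.pairwise_cons.mp hp1).1 z hz,
          (List.pairwise_cons.mp hp1).2⟩
      rw [ih _ hq]
      -- same distinct years, same totals
      have hset : PySem.Set.ofList (((p.1, p0.2 + p.2) :: ps).map (fun q => q.1))
          = PySem.Set.ofList ((p0 :: p :: ps).map (fun q => q.1)) := by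
        simp only [List.map_cons, h]
        exact (pv_ofList_cons_cons p.1 (ps.map (fun q => q.1))).symm
      have hsum : ∀ y, pvSum ((p.1, p0.2 + p.2) :: ps) y = pvSum (p0 :: p :: ps) y := by
        intro y
        rw [pv_pvSum_cons, pv_pvSum_cons, pv_pvSum_cons]
        by_cases hy : p.1 = y
        · rw [if_pos hy, if_pos (h.trans hy), if_pos hy]; ring
        · rw [if_neg hy, if_neg (fun e => hy ((h.symm.trans e))), if_neg hy]; ring
      rw [pvCanon, pvCanon, hset]
      exact List.map_congr_left (fun y _ => by rw [hsum])
    · rw [pvGrp, if_neg (by simp [h])]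
      rw [ih p hp1]
      have hlt : ∀ z ∈ p :: ps, p0.1 < z.1 := by
        intro z hz
        rcases List.mem_cons.mp hz with rfl | hz'
        · exact lt_of_le_of_ne (hp0 z hz) h
        · exact lt_of_lt_of_le (lt_of_le_of_ne (hp0 p (List.mem_cons_self)) h)
            ((List.pairwise_cons.mp hp1).1 z hz')
      have hmem : p0.1 ∉ (p :: ps).map (fun q => q.1) := by
        intro hm
        rcases List.mem_map.mp hm with ⟨z, hz, he⟩
        exact absurd he.symm (ne_of_lt (hlt z hz))
      have hset2 : PySem.Set.ofList ((p0 :: p :: ps).map (fun q => q.1))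
          = p0.1 :: PySem.Set.ofList ((p :: ps).map (fun q => q.1)) := by
        rw [List.map_cons, PySem.Set.ofList_cons,
          pv_discard_of_not_mem (fun hm => hmem ((PySem.Set.mem_ofList _ _).mp hm))]
      rw [pvCanon, pvCanon, hset2, List.map_cons]
      congr 1
      · -- head pair is p0 itself
        have h0 : pvSum (p0 :: p :: ps) p0.1 = p0.2 := by
          rw [pv_pvSum_cons, if_pos rfl,
            pv_pvSum_eq_zero (fun q hq => ne_of_gt (hlt q hq)), add_zero]
        show p0 = (p0.1, pvSum (p0 :: p :: ps) p0.1)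
        rw [h0]
      · refine List.map_congr_left (fun y hy => ?_)
        have hyne : p0.1 ≠ y := by
          rcases List.mem_cons.mp ((PySem.Set.mem_ofList _ y).mp hy) with rfl | hy'
          · exact h
          · rcases List.mem_map.mp hy' with ⟨z, hz, he⟩
            exact fun e => (ne_of_lt (hlt z (List.mem_cons_of_mem p hz))) (e.trans he.symm)
        show (y, pvSum (p :: ps) y) = (y, pvSum (p0 :: p :: ps) y)
        rw [pv_pvSum_cons p0 (p :: ps) y, if_neg hyne, zero_add]

lemma pv_sorted2_canon (L : List (Int × Int)) :
    PySem.List.sorted2 (pvCanon L) (fun p => p.1) (fun p => p.2) false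
      = pvCanon (PySem.List.sorted2 L (fun p => p.1) (fun p => p.2) false) := by
  have hperm : (PySem.List.sorted2 L (fun p => p.1) (fun p => p.2) false).Perm L :=
    PySem.List.sorted2_perm L _ _ false
  have hpwle := pv_sorted2_pairwise L
  apply pv_sorted2_eq
  · -- the two aggregates are permutations: same distinct years, same totals
    have hsets : (PySem.Set.ofList ((PySem.List.sorted2 L (fun p => p.1) (fun p => p.2) false).map
          (fun p => p.1))).Perm (PySem.Set.ofList (L.map (fun p => p.1))) := by
      refine (List.perm_ext_iff_of_nodup (PySem.Set.nodup_ofList _)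
        (PySem.Set.nodup_ofList _)).mpr (fun y => ?_)
      rw [PySem.Set.mem_ofList, PySem.Set.mem_ofList]
      exact (hperm.map (fun p => p.1)).mem_iff
    have h1 : pvCanon (PySem.List.sorted2 L (fun p => p.1) (fun p => p.2) false)
        = (PySem.Set.ofList ((PySem.List.sorted2 L (fun p => p.1) (fun p => p.2) false).map
            (fun p => p.1))).map (fun y => (y, pvSum L y)) :=
      List.map_congr_left (fun y _ => by rw [pv_pvSum_perm hperm])
    rw [h1]
    exact hsets.map _
  · -- its years are strictly increasing
    have hlt := pv_pairwise_lt_ofList _ (List.pairwise_map.mpr hpwle)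
    rw [pvCanon, List.pairwise_map]
    exact hlt.imp (fun hab => hab)

lemma pv_foldl_group_canon (l : List (Int × Int))
    (h : l.Pairwise (fun a b => a.1 ≤ b.1)) :
    l.foldl pvGroupStep [] = pvCanon l := by
  cases l with
  | nil => rfl
  | cons p ps =>
    rw [List.foldl_cons]
    have h0 : pvGroupStep [] p = [] ++ [p] := rfl
    rw [h0, pv_foldl_grp ps [] p, List.nil_append]
    exact pv_grp_canon ps p h

-- ===== VERDICT (by name: the statement is the Claim_ definition above) =====
theorem printedWords_spec : Claim_equal_printedWords := by
  intro words _
  show printedWords words = printedWords_alt words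
  unfold printedWords printedWords_alt
  rw [show ((PySem.Dict.ofList words).values.foldl
        (fun yearCounts subDict =>
          (PySem.Dict.ofList subDict).items.foldl
            (fun yearCounts p =>
              if yearCounts.contains p.1 then yearCounts.modify p.1 0 (· + p.2)
              else yearCounts.insert p.1 p.2)
            yearCounts)
        (PySem.Dict.empty : PySem.Dict Int Int))
      = (((PySem.Dict.ofList words).values.flatMap
            (fun subDict => (PySem.Dict.ofList subDict).items)).foldl
          (fun yearCounts p =>
            if yearCounts.contains p.1 then yearCounts.modify p.1 0 (· + p.2)
            else yearCounts.insert p.1 p.2)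
          (PySem.Dict.empty : PySem.Dict Int Int))
    from (pv_foldl_flatMap _ _ _ _).symm]
  rw [show (fun (yearCounts : PySem.Dict Int Int) (p : Int × Int) =>
        if yearCounts.contains p.1 then yearCounts.modify p.1 0 (· + p.2)
        else yearCounts.insert p.1 p.2)
      = (fun d p => d.insert p.1 (d.getD p.1 0 + p.2))
    from funext fun yc => funext fun p => pv_step_eq yc p]
  rw [pv_items_foldl, pv_sorted2_canon]
  exact (pv_foldl_group_canon _ (pv_sorted2_pairwise _)).symm
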